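-- pv_equiv track=rewrite | github.com/Garco97/NLP_Final | data_process_noGUI.py | clean_document
-- ===== SOURCE A (Python) =====
-- import string
--
-- def clean_document(document):
--     new_document = list()
--     for word in document:
--         bad = False
--         for punct in string.punctuation:
--             if word in string.punctuation or punct in word:
--                 bad = True
--                 break
--         if not bad:
--             new_document.append(word)
--     return new_document
-- ===== SOURCE B (Python) =====
-- import string
--
-- def clean_document(document):
--     punct = set(string.punctuation)
--     return [w for w in document if w and not any(c in punct for c in w)]
-- ===== Notes on version B (the rewrite author's own statement) =====
-- stated objective: faster
-- what changed: Replaces the nested loop over the 32 punctuation characters (with a substring test against string.punctuation on every iteration) by a single filter that scans each word's characters once against a precomputed punctuation set; empty words are dropped by the truthiness guard instead of the accidental ''-is-a-substring test.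
import Mathlib
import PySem

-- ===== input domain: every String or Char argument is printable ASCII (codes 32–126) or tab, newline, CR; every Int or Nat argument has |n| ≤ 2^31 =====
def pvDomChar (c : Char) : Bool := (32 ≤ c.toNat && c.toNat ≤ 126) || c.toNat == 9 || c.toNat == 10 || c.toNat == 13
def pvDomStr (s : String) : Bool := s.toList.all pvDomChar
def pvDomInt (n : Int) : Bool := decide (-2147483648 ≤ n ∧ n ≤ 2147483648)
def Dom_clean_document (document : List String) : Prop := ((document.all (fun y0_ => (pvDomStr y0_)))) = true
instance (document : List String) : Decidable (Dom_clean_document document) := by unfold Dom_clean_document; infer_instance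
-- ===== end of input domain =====

-- B replaces A's inner loop over the 32 punctuation characters (which re-tests
-- 'word in string.punctuation' each iteration) by one filter scanning each word's
-- characters against a precomputed punctuation set; same return value.

-- string.punctuation
def pyPunctuation : String := "!\"#$%&'()*+,-./:;<=>?@[\\]^_`{|}~"

-- ===== PORT A =====
-- 'for punct in string.punctuation: if word in string.punctuation or punct in word: bad=True; break'
-- (the break-on-first-hit loop setting a Bool flag is List.any; substring test = PySem isIn)
def clean_document (document : List String) : List String :=
  document.foldl (fun new_document word =>
    let bad := pyPunctuation.toList.any (fun punct =>
      PySem.Str.isIn word pyPunctuation || PySem.Chars.isIn [punct] word.toList)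
    if bad then new_document else new_document ++ [word]) []

-- ===== PORT B =====
-- punct = set(string.punctuation)
def punctSet : PySem.Set Char := PySem.Set.ofList pyPunctuation.toList

-- [w for w in document if w and not any(c in punct for c in w)]
def clean_document_alt (document : List String) : List String :=
  document.filter (fun w =>
    !w.toList.isEmpty && !(w.toList.any (fun c => PySem.Set.contains punctSet c)))

-- ===== PRECONDITION & SPEC =====
def Spec_clean_document (document : List String) (out : List String) : Prop := out = clean_document_alt document
instance (document : List String) (out : List String) : Decidable (Spec_clean_document document out) := by unfold Spec_clean_document; infer_instance

-- ===== CLAIM (what is proved, stated in full; the proofs are below) =====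
def Claim_equal_clean_document : Prop := ∀ (document : List String), Dom_clean_document document → Spec_clean_document document (clean_document document)

-- ===== LEMMAS AND PROOFS =====

-- A's 'bad' flag for a word with characters cs equals 'cs is empty or contains a punctuation character'
lemma bad_chars (cs : List Char) :
    (pyPunctuation.toList.any (fun punct =>
        PySem.Chars.isIn cs pyPunctuation.toList || PySem.Chars.isIn [punct] cs))
    = (cs.isEmpty || cs.any (fun c => PySem.Set.contains punctSet c)) := by
  cases cs with
  | nil => decide
  | cons c cs' =>
    simp only [List.isEmpty_cons, Bool.false_or]
    rw [Bool.eq_iff_iff]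
    simp only [List.any_eq_true, Bool.or_eq_true, PySem.Chars.isIn_iff_infix,
      List.singleton_infix_iff, punctSet, PySem.Set.contains_eq_listContains,
      List.contains_eq_mem, PySem.Set.mem_ofList, decide_eq_true_eq]
    constructor
    · rintro ⟨p, hp, h | h⟩
      · exact ⟨c, List.mem_cons_self, h.subset List.mem_cons_self⟩
      · exact ⟨p, h, hp⟩
    · rintro ⟨x, hx, hxP⟩
      exact ⟨x, hxP, Or.inr hx⟩

-- the fold of A, started from any accumulator, is that accumulator ++ B's filter
lemma fold_eq (l : List String) (acc : List String) :
    l.foldl (fun new_document word =>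
      let bad := pyPunctuation.toList.any (fun punct =>
        PySem.Str.isIn word pyPunctuation || PySem.Chars.isIn [punct] word.toList)
      if bad then new_document else new_document ++ [word]) acc
    = acc ++ l.filter (fun w =>
        !w.toList.isEmpty && !(w.toList.any (fun c => PySem.Set.contains punctSet c))) := by
  induction l generalizing acc with
  | nil => simp
  | cons w l ih =>
    simp only [List.foldl_cons, List.filter_cons]
    have hb : (pyPunctuation.toList.any (fun punct =>
        PySem.Str.isIn w pyPunctuation || PySem.Chars.isIn [punct] w.toList))
        = (w.toList.isEmpty || w.toList.any (fun c => PySem.Set.contains punctSet c)) := by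
      rw [← bad_chars w.toList]
      simp [pysem]
    rw [hb]
    cases he : (w.toList.isEmpty || w.toList.any (fun c => PySem.Set.contains punctSet c)) with
    | true =>
      have hq : (!w.toList.isEmpty && !(w.toList.any fun c => punctSet.contains c)) = false := by
        rw [← Bool.not_or, he]; rfl
      rw [if_pos rfl, ih]
      simp only [hq, Bool.false_eq_true, if_false]
    | false =>
      have hq : (!w.toList.isEmpty && !(w.toList.any fun c => punctSet.contains c)) = true := by
        rw [← Bool.not_or, he]; rfl
      rw [if_neg (by simp), ih]
      simp only [hq, if_true]
      rw [List.append_assoc, List.singleton_append]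

theorem clean_document_spec : Claim_equal_clean_document := by
  intro document _
  show clean_document document = clean_document_alt document
  unfold clean_document clean_document_alt
  simpa using fold_eq document []
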